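-- pv_equiv track=rewrite | github.com/Merna-Khalid/knight-s-tour | main.py | get_knight_masks
-- ===== SOURCE A (Python) =====
-- def get_knight_masks(dims, init_val):
--     """
--     Generates bitboard mask to get moves
--     :param dims: dimensions of the board (column, row)
--     :param init_val: maximum value for integer the size of dims multiplied
--     :return: 4 masks for 4 directions
--     """
--     l1_mask = init_val
--     l2_mask = init_val
--     r1_mask = init_val
--     r2_mask = init_val
--
--     mask1 = 1 << (dims[0] - 1)
--     if dims[0] > 1:
--         mask2 = 3 << (dims[0] - 2)
--     else:
--         mask2 = 0
--     mask3 = 1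
--     mask4 = 3
--
--     for i in range(dims[1] + 1):
--         l1_mask &= ~mask1
--         l2_mask &= ~mask2
--         r1_mask &= ~mask3
--         r2_mask &= ~mask4
--         mask1 <<= dims[0]
--         mask2 <<= dims[0]
--         mask3 <<= dims[0]
--         mask4 <<= dims[0]
--
--     l1_mask &= init_val
--     l2_mask &= init_val
--     r1_mask &= init_val
--     r2_mask &= init_val
--
--     return [l1_mask, l2_mask, r1_mask, r2_mask]
-- ===== SOURCE B (Python) =====
-- def get_knight_masks(dims, init_val):
--     """
--     Same masks as A, computed row-wise: build one clear pattern per direction,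
--     tile it over all rows by multiplying with a repunit, then AND once.
--     """
--     cols, rows = dims[0], dims[1]
--     n = rows + 1
--     if n < 0:
--         n = 0
--     # repunit: a 1 bit at the bottom of each of the n rows
--     rep = ((1 << (cols * n)) - 1) // ((1 << cols) - 1)
--     row_mask = (1 << cols) - 1
--     p1 = 1 << (cols - 1)
--     p2 = (3 << (cols - 2)) if cols > 1 else 0
--     out = []
--     for p in (p1, p2, 1, 3):
--         # tile p over the rows, one <= cols-bit chunk at a time (handles the
--         # case where p spills into the next row, e.g. cols == 1)
--         tiled = 0
--         shift = 0
--         while p: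
--             tiled |= ((p & row_mask) * rep) << shift
--             p >>= cols
--             shift += cols
--         out.append(init_val & ~tiled)
--     return out
-- ===== Notes on version B (the rewrite author's own statement) =====
-- stated objective: faster
-- what changed: Instead of looping over all rows ANDing out four shifted masks per iteration, B builds each direction's one-row clear pattern once, tiles it over all rows in one step by multiplying with a repunit (sum of 2^(cols*i), obtained by one big-integer division), and does a single AND-NOT with init_val.
import Mathlib
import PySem

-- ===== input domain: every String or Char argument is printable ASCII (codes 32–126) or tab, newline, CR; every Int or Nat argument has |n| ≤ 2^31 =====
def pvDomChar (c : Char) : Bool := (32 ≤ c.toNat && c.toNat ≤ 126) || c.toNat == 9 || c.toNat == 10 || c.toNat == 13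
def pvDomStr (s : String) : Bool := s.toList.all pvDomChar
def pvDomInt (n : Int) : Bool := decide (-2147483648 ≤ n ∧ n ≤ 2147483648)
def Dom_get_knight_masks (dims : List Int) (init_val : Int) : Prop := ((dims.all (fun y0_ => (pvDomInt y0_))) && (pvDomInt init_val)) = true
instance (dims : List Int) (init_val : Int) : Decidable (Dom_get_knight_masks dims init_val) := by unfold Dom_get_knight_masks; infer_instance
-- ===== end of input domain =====

-- B builds each mask's clear pattern for a single row and tiles it over all rows at once
-- (repunit multiplication), replacing A's per-row loop; measurably faster on large boards.

-- ===== PORT A =====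
-- the loop body of A's `for i in range(dims[1] + 1)` (the index i is unused by the body)
def knightStep (d0 : Int)
    (st : Int × Int × Int × Int × Int × Int × Int × Int) :
    Int × Int × Int × Int × Int × Int × Int × Int :=
  let (l1, l2, r1, r2, m1, m2, m3, m4) := st
  (PySem.Int.band l1 (Int.not m1), PySem.Int.band l2 (Int.not m2),
   PySem.Int.band r1 (Int.not m3), PySem.Int.band r2 (Int.not m4),
   m1 <<< d0.toNat, m2 <<< d0.toNat, m3 <<< d0.toNat, m4 <<< d0.toNat)
   -- `mask <<= dims[0]`: Pre_ gives 1 ≤ dims[0], so `.toNat` of the shift amount is exact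

def get_knight_masks (dims : List Int) (init_val : Int) : List Int :=
  let d0 := PySem.List.pyGetD dims 0 0   -- dims[0]; in range under Pre_ (2 ≤ dims.length)
  let d1 := PySem.List.pyGetD dims 1 0   -- dims[1]
  let mask1 : Int := 1 <<< (d0 - 1).toNat  -- `1 << (dims[0]-1)`: Python raises for dims[0] < 1; Pre_ excludes that
  let mask2 : Int := if d0 > 1 then 3 <<< (d0 - 2).toNat else 0
  let mask3 : Int := 1
  let mask4 : Int := 3
  let s := (PySem.List.pyRange 0 (d1 + 1) 1).foldl (fun st _ => knightStep d0 st)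
    (init_val, init_val, init_val, init_val, mask1, mask2, mask3, mask4)
  [PySem.Int.band s.1 init_val, PySem.Int.band s.2.1 init_val,
   PySem.Int.band s.2.2.1 init_val, PySem.Int.band s.2.2.2.1 init_val]

-- ===== PORT B =====
def get_knight_masks_alt (dims : List Int) (init_val : Int) : List Int :=
  let cols := PySem.List.pyGetD dims 0 0   -- dims[0]; in range under Pre_
  let rows := PySem.List.pyGetD dims 1 0   -- dims[1]
  let n0 := rows + 1
  let n := if n0 < 0 then 0 else n0
  -- shifts amounts are nonnegative here (1 ≤ cols, 0 ≤ n under Pre_), so `.toNat` is exact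
  let rep := PySem.Int.floordiv ((1 <<< (cols * n).toNat) - 1) ((1 <<< cols.toNat) - 1)
  let row_mask : Int := (1 <<< cols.toNat) - 1
  let p1 : Int := 1 <<< (cols - 1).toNat
  let p2 : Int := if cols > 1 then 3 <<< (cols - 2).toNat else 0
  [p1, p2, 1, 3].map (fun p =>
    let lo := PySem.Int.band p row_mask
    let hi := p >>> cols.toNat
    PySem.Int.band init_val
      (Int.not (PySem.Int.bor (lo * rep) ((hi * rep) <<< cols.toNat))))

-- ===== PRECONDITION & SPEC =====
-- Pre_ excludes exactly the inputs where Python A raises: dims shorter than 2 (IndexError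
-- on dims[0]/dims[1]) and dims[0] < 1 (ValueError: negative shift count in `1 << (dims[0]-1)`).
def Pre_get_knight_masks (dims : List Int) (init_val : Int) : Prop :=
  2 ≤ dims.length ∧ 1 ≤ PySem.List.pyGetD dims 0 0
instance (dims : List Int) (init_val : Int) : Decidable (Pre_get_knight_masks dims init_val) := by
  unfold Pre_get_knight_masks; infer_instance
def pvWitness_get_knight_masks : List Int × Int := ([3, 3], 511)

def Spec_get_knight_masks (dims : List Int) (init_val : Int) (out : List Int) : Prop := out = get_knight_masks_alt dims init_val
instance (dims : List Int) (init_val : Int) (out : List Int) : Decidable (Spec_get_knight_masks dims init_val out) := by unfold Spec_get_knight_masks; infer_instance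

-- ===== CLAIM (what is proved, stated in full; the proofs are below) =====
def Claim_equal_get_knight_masks : Prop := ∀ (dims : List Int) (init_val : Int), Dom_get_knight_masks dims init_val → Pre_get_knight_masks dims init_val → Spec_get_knight_masks dims init_val (get_knight_masks dims init_val)

-- ===== LEMMAS AND PROOFS =====

-- the repunit 1 + 2^c + … + 2^(c(n-1)), as a Nat recursion
def pvR (c : Nat) : Nat → Nat
  | 0 => 0
  | n + 1 => 1 + 2 ^ c * pvR c n

-- union of the clear pattern p shifted over rows 0..n-1 (what A's loop removes)
def pvU (c : Nat) (p : Nat) : Nat → Nat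
  | 0 => 0
  | n + 1 => p ||| pvU c (p <<< c) n

theorem ldiff_add_and (x a : Nat) : Nat.ldiff x a + (x &&& a) = x := by
  induction x using Nat.binaryRec generalizing a with
  | zero =>
    have : Nat.ldiff 0 a = 0 := by
      apply Nat.eq_of_testBit_eq; intro k; simp [Nat.testBit_ldiff]
    simp [this]
  | bit b n ih =>
    rw [← Nat.bit_testBit_zero_shiftRight_one a, Nat.ldiff_bit, Nat.land_bit]
    have := ih (a >>> 1)
    cases b <;> cases h : a.testBit 0 <;> simp [Nat.bit] <;> omega

theorem sub_and_eq_ldiff (x a : Nat) : x - (x &&& a) = Nat.ldiff x a := by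
  have := ldiff_add_and x a; omega

theorem lor_eq_add_of_and_eq_zero {y z : Nat} (h : y &&& z = 0) : y ||| z = y + z := by
  induction y using Nat.binaryRec generalizing z with
  | zero => simp
  | bit b n ih =>
    rw [← Nat.bit_testBit_zero_shiftRight_one z] at h ⊢
    rw [Nat.land_bit] at h
    rw [Nat.lor_bit]
    have h2 : n &&& (z >>> 1) = 0 ∧ (b && z.testBit 0) = false := by
      cases hc : (b && z.testBit 0) <;> rw [hc] at h <;> simp [Nat.bit] at h <;> simp [h]
    have := ih h2.1
    have hbf := h2.2
    cases b <;> cases hz : z.testBit 0 <;> rw [hz] at hbf <;> simp [Nat.bit] at hbf ⊢ <;> omega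

theorem and_shiftLeft_eq_zero {a c : Nat} (x : Nat) (h : a < 2 ^ c) : a &&& (x <<< c) = 0 := by
  apply Nat.eq_of_testBit_eq
  intro k
  simp only [Nat.testBit_land, Nat.testBit_shiftLeft, Nat.zero_testBit]
  by_cases hk : c ≤ k
  · have : a.testBit k = false :=
      Nat.testBit_eq_false_of_lt (lt_of_lt_of_le h (Nat.pow_le_pow_right (by norm_num) hk))
    simp [this]
  · simp [hk]

theorem not_natCast (a : Nat) : Int.not (a : Int) = Int.negSucc a := rfl

theorem band_cast_negSucc (m a : Nat) :
    PySem.Int.band (Int.ofNat m) (Int.negSucc a) = Int.ofNat (Nat.ldiff m a) := by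
  simp [PySem.Int.band, sub_and_eq_ldiff]

theorem band_negSucc_negSucc (m a : Nat) :
    PySem.Int.band (Int.negSucc m) (Int.negSucc a) = Int.negSucc (m ||| a) := by
  simp [PySem.Int.band]
  omega

theorem ldiff_ldiff (m a b : Nat) : Nat.ldiff (Nat.ldiff m a) b = Nat.ldiff m (a ||| b) := by
  apply Nat.eq_of_testBit_eq; intro k
  simp [Nat.testBit_ldiff]
  rw [Bool.and_assoc]

theorem band_not_not (v : Int) (a b : Nat) :
    PySem.Int.band (PySem.Int.band v (Int.not (a : Int))) (Int.not (b : Int)) =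
      PySem.Int.band v (Int.not ((a ||| b : Nat) : Int)) := by
  rw [not_natCast, not_natCast, not_natCast]
  cases v with
  | ofNat m => rw [band_cast_negSucc, band_cast_negSucc, band_cast_negSucc, ldiff_ldiff]
  | negSucc m => rw [band_negSucc_negSucc, band_negSucc_negSucc, band_negSucc_negSucc, Nat.lor_assoc]

theorem ldiff_and_self (m a : Nat) : Nat.ldiff m a &&& m = Nat.ldiff m a := by
  apply Nat.eq_of_testBit_eq; intro k
  simp [Nat.testBit_ldiff]
  tauto

theorem band_not_self (v : Int) (a : Nat) :
    PySem.Int.band (PySem.Int.band v (Int.not (a : Int))) v =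
      PySem.Int.band v (Int.not (a : Int)) := by
  rw [not_natCast]
  cases v with
  | ofNat m =>
    rw [band_cast_negSucc]
    show PySem.Int.band ((Nat.ldiff m a : Nat) : Int) ((m : Nat) : Int) = ((Nat.ldiff m a : Nat) : Int)
    rw [PySem.Int.band_natCast, ldiff_and_self]
  | negSucc m =>
    rw [band_negSucc_negSucc, band_negSucc_negSucc]
    congr 1
    apply Nat.eq_of_testBit_eq; intro k
    simp
    tauto

theorem foldl_const_iterate {α β : Type} (L : List β) (f : α → α) (s : α) :
    List.foldl (fun s _ => f s) s L = f^[L.length] s := by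
  induction L generalizing s with
  | nil => rfl
  | cons x xs ih => simp [List.foldl, ih, Function.iterate_succ_apply]

theorem pvR_geom (c n : Nat) : ((2 ^ c - 1 : Int)) * (pvR c n : Int) = 2 ^ (c * n) - 1 := by
  induction n with
  | zero => simp [pvR]
  | succ n ih =>
    simp only [pvR, Nat.mul_succ]
    push_cast
    rw [pow_add]
    linear_combination ((2:Int) ^ c) * ih

theorem lor_exchange (p q r s : Nat) : (p ||| q) ||| (r ||| s) = (p ||| r) ||| (q ||| s) := by
  apply Nat.eq_of_testBit_eq; intro k
  simp only [Nat.testBit_lor]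
  cases p.testBit k <;> cases q.testBit k <;> cases r.testBit k <;> cases s.testBit k <;> rfl

theorem pvU_lor (c n : Nat) : ∀ x y, pvU c (x ||| y) n = pvU c x n ||| pvU c y n := by
  induction n with
  | zero => simp [pvU]
  | succ n ih =>
    intro x y
    simp only [pvU, Nat.shiftLeft_or_distrib, ih]
    exact lor_exchange _ _ _ _

theorem pvU_shift (c n : Nat) : ∀ k x, pvU c (x <<< k) n = (pvU c x n) <<< k := by
  induction n with
  | zero => simp [pvU]
  | succ n ih =>
    intro k x
    simp only [pvU]
    have h1 : (x <<< k) <<< c = (x <<< c) <<< k := by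
      rw [← Nat.shiftLeft_add, ← Nat.shiftLeft_add, Nat.add_comm]
    rw [h1, ih, Nat.shiftLeft_or_distrib]

theorem pvU_mul {a c : Nat} (n : Nat) (h : a < 2 ^ c) : pvU c a n = a * pvR c n := by
  induction n with
  | zero => simp [pvU, pvR]
  | succ n ih =>
    simp only [pvU, pvR]
    rw [pvU_shift, ih, lor_eq_add_of_and_eq_zero (and_shiftLeft_eq_zero _ h), Nat.shiftLeft_eq]
    ring

theorem pvU_split {p c : Nat} (n : Nat) (hp : p < 2 ^ (2 * c)) :
    (p % 2 ^ c) * pvR c n ||| ((p / 2 ^ c) * pvR c n) <<< c = pvU c p n := by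
  have hcpos : 0 < 2 ^ c := Nat.pow_pos (by norm_num)
  have hlo : p % 2 ^ c < 2 ^ c := Nat.mod_lt _ hcpos
  have hhi : p / 2 ^ c < 2 ^ c := by
    rw [Nat.div_lt_iff_lt_mul hcpos, ← pow_add]
    simpa [two_mul] using hp
  have hsplit : (p % 2 ^ c) ||| ((p / 2 ^ c) <<< c) = p := by
    rw [lor_eq_add_of_and_eq_zero (and_shiftLeft_eq_zero _ hlo), Nat.shiftLeft_eq]
    exact Nat.mod_add_div' p (2 ^ c)
  calc (p % 2 ^ c) * pvR c n ||| ((p / 2 ^ c) * pvR c n) <<< c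
      = pvU c (p % 2 ^ c) n ||| (pvU c (p / 2 ^ c) n) <<< c := by
        rw [pvU_mul n hlo, pvU_mul n hhi]
    _ = pvU c (p % 2 ^ c) n ||| pvU c ((p / 2 ^ c) <<< c) n := by rw [pvU_shift]
    _ = pvU c ((p % 2 ^ c) ||| ((p / 2 ^ c) <<< c)) n := (pvU_lor _ _ _ _).symm
    _ = pvU c p n := by rw [hsplit]

theorem knight_loop (d0 : Int) (c : Nat) (hc : d0.toNat = c) (n : Nat)
    (v1 v2 v3 v4 m1 m2 m3 m4 : Int) (P1 P2 P3 P4 : Nat)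
    (h1 : m1 = (P1 : Int)) (h2 : m2 = (P2 : Int)) (h3 : m3 = (P3 : Int)) (h4 : m4 = (P4 : Int)) :
    (fun st => knightStep d0 st)^[n] (v1, v2, v3, v4, m1, m2, m3, m4) =
      (PySem.Int.band v1 (Int.not (pvU c P1 n : Nat)),
       PySem.Int.band v2 (Int.not (pvU c P2 n : Nat)),
       PySem.Int.band v3 (Int.not (pvU c P3 n : Nat)),
       PySem.Int.band v4 (Int.not (pvU c P4 n : Nat)),
       ((P1 <<< (c * n) : Nat) : Int), ((P2 <<< (c * n) : Nat) : Int),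
       ((P3 <<< (c * n) : Nat) : Int), ((P4 <<< (c * n) : Nat) : Int)) := by
  subst h1 h2 h3 h4
  induction n generalizing v1 v2 v3 v4 P1 P2 P3 P4 with
  | zero =>
    simp only [Function.iterate_zero, id_eq, pvU, Nat.mul_zero, Nat.shiftLeft_zero]
    simp [show Int.not 0 = -1 from rfl, PySem.Int.band_neg_one]
  | succ n ih =>
    rw [Function.iterate_succ_apply]
    have hstep : knightStep d0 (v1, v2, v3, v4, (P1 : Int), (P2 : Int), (P3 : Int), (P4 : Int)) =
        (PySem.Int.band v1 (Int.not (P1 : Int)), PySem.Int.band v2 (Int.not (P2 : Int)),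
         PySem.Int.band v3 (Int.not (P3 : Int)), PySem.Int.band v4 (Int.not (P4 : Int)),
         ((P1 <<< c : Nat) : Int), ((P2 <<< c : Nat) : Int),
         ((P3 <<< c : Nat) : Int), ((P4 <<< c : Nat) : Int)) := by
      simp [knightStep, hc, Int.natCast_shiftLeft]
    rw [hstep, ih]
    simp only [pvU, band_not_not]
    have hsh : ∀ P : Nat, (P <<< c) <<< (c * n) = P <<< (c * (n + 1)) := by
      intro P
      rw [← Nat.shiftLeft_add]
      congr 1
      ring
    rw [hsh, hsh, hsh, hsh]

theorem cast_one_shiftLeft (k : Nat) : ((1 <<< k : Nat) : Int) = (2:Int) ^ k := by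
  rw [Nat.shiftLeft_eq, Nat.one_mul]
  push_cast
  ring

theorem rep_eq (c N : Nat) (hc : 1 ≤ c) :
    PySem.Int.floordiv (((1 <<< (c * N) : Nat) : Int) - 1) (((1 <<< c : Nat) : Int) - 1) = ((pvR c N : Nat) : Int) := by
  have hpow : (2:Int) ^ 1 ≤ 2 ^ c := pow_le_pow_right₀ (by norm_num) hc
  have hpos : (0:Int) < 2 ^ c - 1 := by norm_num at hpow ⊢; linarith
  rw [cast_one_shiftLeft, cast_one_shiftLeft, PySem.Int.floordiv_eq_ediv_of_pos hpos,
    ← pvR_geom c N, Int.mul_ediv_cancel_left _ (by linarith)]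

theorem elem_eq (v : Int) (c N P : Nat) (p : Int) (hp : p = (P : Int)) (hP : P < 2 ^ (2 * c)) :
    PySem.Int.band v (Int.not (PySem.Int.bor
        (PySem.Int.band p (((1 <<< c : Nat) : Int) - 1) * ((pvR c N : Nat) : Int))
        (((p >>> c) * ((pvR c N : Nat) : Int)) <<< c))) =
    PySem.Int.band (PySem.Int.band v (Int.not ((pvU c P N : Nat) : Int))) v := by
  subst hp
  have h1 : (1:Nat) ≤ 2 ^ c := Nat.pow_pos (by norm_num)
  have hrow : ((1 <<< c : Nat) : Int) - 1 = ((2 ^ c - 1 : Nat) : Int) := by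
    rw [cast_one_shiftLeft]
    push_cast [h1]
    ring
  rw [hrow, PySem.Int.band_natCast, Nat.and_two_pow_sub_one_eq_mod,
      ← Int.natCast_shiftRight, Nat.shiftRight_eq_div_pow,
      ← Int.natCast_mul, ← Int.natCast_mul, ← Int.natCast_shiftLeft, PySem.Int.bor_natCast,
      pvU_split N hP, band_not_self]

-- ===== VERDICT (by name: the statement is the Claim_ definition above) =====
theorem get_knight_masks_spec : Claim_equal_get_knight_masks := by
  intro dims init_val _ hpre
  obtain ⟨hlen, hd0⟩ := hpre
  unfold Spec_get_knight_masks
  simp only [get_knight_masks, get_knight_masks_alt, List.map]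
  set d0 := PySem.List.pyGetD dims 0 0 with hd0def
  set d1 := PySem.List.pyGetD dims 1 0 with hd1def
  set c := d0.toNat with hcdef
  set N := (d1 + 1).toNat with hNdef
  have hc1 : 1 ≤ c := by omega
  have hrange : (PySem.List.pyRange 0 (d1 + 1) 1).length = N := by
    rw [hNdef]
    simp [pysem]
  have hn : (if d1 + 1 < 0 then 0 else d1 + 1) = (N : Int) := by omega
  have hcn : (d0 * (N : Int)).toNat = c * N := by
    have hd0c : d0 = (c : Int) := by omega
    rw [hd0c, ← Int.natCast_mul, Int.toNat_natCast]
  have e1 : (d0 - 1).toNat = c - 1 := by omega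
  have hm3 : (1:Int) = ((1 : Nat) : Int) := by norm_num
  have hm4 : (3:Int) = ((3 : Nat) : Int) := by norm_num
  have hP1 : (1 <<< (c - 1) : Nat) < 2 ^ (2 * c) := by
    rw [Nat.shiftLeft_eq, Nat.one_mul]
    exact Nat.pow_lt_pow_right (by norm_num) (by omega)
  have hP3 : (1 : Nat) < 2 ^ (2 * c) := Nat.one_lt_two_pow_iff.mpr (by omega)
  have hP4 : (3 : Nat) < 2 ^ (2 * c) := by
    calc (3:Nat) < 2 ^ 2 := by norm_num
    _ ≤ 2 ^ (2 * c) := Nat.pow_le_pow_right (by norm_num) (by omega)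
  rw [foldl_const_iterate, hrange, hn, hcn, e1]
  by_cases hgt : d0 > 1
  · have e2 : (d0 - 2).toNat = c - 2 := by omega
    have hP2 : (3 <<< (c - 2) : Nat) < 2 ^ (2 * c) := by
      rw [Nat.shiftLeft_eq]
      calc 3 * 2 ^ (c - 2) < 2 ^ 2 * 2 ^ (c - 2) := by
            have := Nat.pow_pos (a := 2) (n := c - 2) (by norm_num)
            nlinarith
      _ = 2 ^ (c - 2 + 2) := by rw [pow_add]; ring
      _ ≤ 2 ^ (2 * c) := Nat.pow_le_pow_right (by norm_num) (by omega)
    simp only [if_pos hgt, e2]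
    rw [knight_loop d0 c rfl N init_val init_val init_val init_val
          _ _ _ _ _ _ _ _ rfl rfl hm3 hm4]
    rw [rep_eq c N hc1]
    rw [elem_eq init_val c N (1 <<< (c - 1)) _ rfl hP1, elem_eq init_val c N (3 <<< (c - 2)) _ rfl hP2,
        elem_eq init_val c N 1 _ hm3 hP3, elem_eq init_val c N 3 _ hm4 hP4]
  · have hm2 : (0:Int) = ((0 : Nat) : Int) := by norm_num
    have hP2 : (0 : Nat) < 2 ^ (2 * c) := Nat.pow_pos (by norm_num)
    simp only [if_neg hgt]
    rw [knight_loop d0 c rfl N init_val init_val init_val init_val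
          _ _ _ _ _ _ _ _ rfl hm2 hm3 hm4]
    rw [rep_eq c N hc1]
    rw [elem_eq init_val c N (1 <<< (c - 1)) _ rfl hP1, elem_eq init_val c N 0 _ hm2 hP2,
        elem_eq init_val c N 1 _ hm3 hP3, elem_eq init_val c N 3 _ hm4 hP4]
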